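-- pv_equiv track=rewrite | github.com/deril2605/DealSignal-AI-In-The-Wild | serve/dealsignal/pipeline/narrative.py | _sorted_unique
-- ===== SOURCE A (Python) =====
-- def _sorted_unique(values: list[str] | tuple[str, ...]) -> list[str]:
--     seen: dict[str, str] = {}
--     for value in values:
--         item = str(value).strip()
--         if not item:
--             continue
--         key = item.lower()
--         if key not in seen:
--             seen[key] = item
--     return [seen[key] for key in sorted(seen)]
-- ===== SOURCE B (Python) =====
-- def _sorted_unique(values):
--     items = [item for item in (str(value).strip() for value in values) if item]
--     items.sort(key=str.lower)
--     out = []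
--     last = None
--     for item in items:
--         key = item.lower()
--         if key != last:
--             out.append(item)
--             last = key
--     return out
-- ===== Notes on version B (the rewrite author's own statement) =====
-- stated objective: alternative
-- what changed: Flips the phase order: instead of building a first-seen dict keyed by lowercase and then sorting its keys, B stable-sorts the stripped items by lowercase key and deduplicates in a single grouping scan that emits the first element of each equal-key run (no dict).
import Mathlib
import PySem

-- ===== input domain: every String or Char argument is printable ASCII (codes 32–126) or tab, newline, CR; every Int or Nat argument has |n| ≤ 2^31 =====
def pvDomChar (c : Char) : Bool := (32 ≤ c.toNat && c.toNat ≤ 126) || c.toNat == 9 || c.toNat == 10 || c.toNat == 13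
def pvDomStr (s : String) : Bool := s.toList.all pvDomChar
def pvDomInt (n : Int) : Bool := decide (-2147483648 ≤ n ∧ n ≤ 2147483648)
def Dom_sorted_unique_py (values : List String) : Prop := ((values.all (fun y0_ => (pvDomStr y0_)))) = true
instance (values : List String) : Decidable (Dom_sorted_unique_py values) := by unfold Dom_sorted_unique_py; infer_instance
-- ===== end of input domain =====

-- B flips the phase order: instead of A's first-seen dict followed by a key sort, B stable-sorts the stripped items by lowercase key and emits the first element of each equal-key run in one grouping pass (alternative algorithm, no dict).

-- ===== PORT A =====
-- 'seen[key]' in the final comprehension always hits (key ∈ seen); ported with getD "" (exact on those keys).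
def sorted_unique_py (values : List String) : List String :=
  let seen : PySem.Dict String String := values.foldl (fun seen value =>
    let item := PySem.Str.strip value
    if item = "" then seen
    else
      let key := PySem.Str.lower item
      if seen.contains key then seen
      else seen.insert key item) PySem.Dict.empty
  (PySem.List.sorted seen.keys (fun k => k) false).map (fun k => seen.getD k "")

-- ===== PORT B =====
-- items.sort(key=str.lower) is PySem.List.sorted (stable); the loop carries (out, last) as one pair accumulator.
def sorted_unique_py_alt (values : List String) : List String :=
  let items := (values.map (fun value => PySem.Str.strip value)).filter (fun item => !(item == ""))
  let s := PySem.List.sorted items (fun item => PySem.Str.lower item) false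
  (s.foldl (fun (acc : List String × Option String) item =>
      if some (PySem.Str.lower item) ≠ acc.2 then (acc.1 ++ [item], some (PySem.Str.lower item))
      else acc) ([], none)).1

-- ===== PRECONDITION & SPEC =====
def Spec_sorted_unique_py (values : List String) (out : List String) : Prop := out = sorted_unique_py_alt values
instance (values : List String) (out : List String) : Decidable (Spec_sorted_unique_py values out) := by unfold Spec_sorted_unique_py; infer_instance

-- ===== CLAIM (what is proved, stated in full; the proofs are below) =====
def Claim_equal_sorted_unique_py : Prop := ∀ (values : List String), Dom_sorted_unique_py values → Spec_sorted_unique_py values (sorted_unique_py values)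

-- ===== LEMMAS AND PROOFS =====

theorem insertBy_nil (before : String → String → Bool) (x : String) :
    PySem.List.insertBy before x [] = [x] := by simp [PySem.List.insertBy]

theorem insertBy_cons_of_before (before : String → String → Bool) (x y : String) (ys : List String)
    (h : before x y = true) :
    PySem.List.insertBy before x (y :: ys) = x :: y :: ys := by simp [PySem.List.insertBy, h]

theorem insertBy_cons_of_not_before (before : String → String → Bool) (x y : String) (ys : List String)
    (h : before x y = false) :
    PySem.List.insertBy before x (y :: ys) = y :: PySem.List.insertBy before x ys := by
  simp [PySem.List.insertBy, h]

theorem insertBy_append_skip (before : String → String → Bool) (x : String) (as bs : List String)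
    (h : ∀ a ∈ as, before x a = false) :
    PySem.List.insertBy before x (as ++ bs) = as ++ PySem.List.insertBy before x bs := by
  induction as with
  | nil => simp
  | cons a t ih =>
    simp only [List.cons_append]
    rw [insertBy_cons_of_not_before _ _ _ _ (h a (by simp))]
    rw [ih (fun a ha => h a (by simp [ha]))]

theorem flatMap_ite_of_not_mem (K : List String) (v : String) (f g : String → List String)
    (h : v ∉ K) :
    K.flatMap (fun k => if k = v then f k else g k) = K.flatMap g := by
  apply List.flatMap_congr
  intro a ha
  have hne : a ≠ v := fun hc => h (hc ▸ ha)
  rw [if_neg hne]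

theorem insert_flatMap (x : String) (K : List String) (g : String → List String)
    (hK : K.Pairwise (· < ·))
    (hne : ∀ k ∈ K, g k ≠ [])
    (hkey : ∀ k ∈ K, ∀ y ∈ g k, PySem.Str.lower y = k) :
    PySem.List.insertBy (fun a b => decide (PySem.Str.lower a < PySem.Str.lower b)) x (K.flatMap g) =
      if PySem.Str.lower x ∈ K then
        K.flatMap (fun k => if k = PySem.Str.lower x then g k ++ [x] else g k)
      else
        (PySem.List.insertBy (fun a b => decide (a < b)) (PySem.Str.lower x) K).flatMap
          (fun k => if k = PySem.Str.lower x then [x] else g k) := by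
  induction K with
  | nil => simp [insertBy_nil]
  | cons k K' ih =>
    have hKtail := (List.pairwise_cons.mp hK).2
    have hklt := (List.pairwise_cons.mp hK).1
    rcases lt_trichotomy (PySem.Str.lower x) k with hlt | heq | hgt
    · -- lower x < k : x goes in front as a new singleton group
      have hnotmem : PySem.Str.lower x ∉ k :: K' := by
        intro hm
        rcases List.mem_cons.mp hm with h1 | h1
        · exact absurd h1.symm (ne_of_gt hlt)
        · exact absurd rfl (ne_of_gt (lt_trans hlt (hklt _ h1)))
      have hnotmem' : PySem.Str.lower x ∉ K' := fun hc => hnotmem (by simp [hc])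
      rw [if_neg hnotmem]
      obtain ⟨y0, ys0, hg⟩ := List.exists_cons_of_ne_nil (hne k (by simp))
      have hy0 : PySem.Str.lower y0 = k := hkey k (by simp) y0 (by simp [hg])
      rw [insertBy_cons_of_before _ _ _ _ (decide_eq_true hlt)]
      rw [List.flatMap_cons, hg, List.cons_append,
          insertBy_cons_of_before _ _ _ _ (by rw [hy0]; exact decide_eq_true hlt)]
      rw [List.flatMap_cons, List.flatMap_cons, if_pos rfl, if_neg (ne_of_gt hlt),
          flatMap_ite_of_not_mem K' _ _ _ hnotmem']
      simp [hg]
    · -- lower x = k : x appended at the end of group k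
      have hnotmem' : PySem.Str.lower x ∉ K' := by
        intro hc
        have h2 := hklt _ hc
        rw [heq] at h2
        exact absurd h2 (lt_irrefl k)
      rw [if_pos (by simp [heq])]
      rw [List.flatMap_cons, List.flatMap_cons]
      rw [insertBy_append_skip _ _ _ _ (fun y hy => by
        rw [hkey k (by simp) y hy, heq]; exact decide_eq_false (lt_irrefl k))]
      have hrest : PySem.List.insertBy (fun a b => decide (PySem.Str.lower a < PySem.Str.lower b)) x
          (K'.flatMap g) = x :: K'.flatMap g := by
        cases hK' : K' with
        | nil => simp [insertBy_nil]
        | cons k1 K'' =>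
          obtain ⟨y1, ys1, hg1⟩ := List.exists_cons_of_ne_nil (hne k1 (by simp [hK']))
          have hy1 : PySem.Str.lower y1 = k1 := hkey k1 (by simp [hK']) y1 (by simp [hg1])
          have hk1 : k < k1 := hklt k1 (by simp [hK'])
          rw [List.flatMap_cons, hg1, List.cons_append]
          rw [insertBy_cons_of_before _ _ _ _ (by rw [hy1, heq]; exact decide_eq_true hk1)]
      rw [hrest, if_pos heq.symm, flatMap_ite_of_not_mem K' _ _ _ hnotmem']
      simp
    · -- k < lower x : skip group k and recurse
      have hne' : ¬ PySem.Str.lower x < k := not_lt.mpr (le_of_lt hgt)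
      rw [List.flatMap_cons]
      rw [insertBy_append_skip _ _ _ _ (fun y hy => by
        rw [hkey k (by simp) y hy]; exact decide_eq_false hne')]
      rw [ih hKtail (fun a ha => hne a (by simp [ha])) (fun a ha => hkey a (by simp [ha]))]
      by_cases hm : PySem.Str.lower x ∈ K'
      · rw [if_pos hm, if_pos (by simp [hm]), List.flatMap_cons, if_neg (ne_of_lt hgt)]
      · rw [if_neg hm, if_neg (by simp [hm]; exact ne_of_gt hgt),
            insertBy_cons_of_not_before _ _ _ _ (decide_eq_false hne'),
            List.flatMap_cons, if_neg (ne_of_lt hgt)]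

theorem stable_sorted (L : List String) :
    PySem.List.sorted L (fun s => PySem.Str.lower s) false =
    (PySem.List.sorted (PySem.Set.ofList (L.map (fun s => PySem.Str.lower s))) (fun k => k) false).flatMap
      (fun k => L.filter (fun y => PySem.Str.lower y == k)) := by
  induction L using List.reverseRecOn with
  | nil => rfl
  | append_singleton L x ih =>
    have hKd := PySem.List.sorted_ofList_pairwise_lt (L.map (fun s => PySem.Str.lower s))
    have hmem_iff : ∀ k, k ∈ PySem.List.sorted (PySem.Set.ofList (L.map (fun s => PySem.Str.lower s))) (fun k => k) false ↔ k ∈ L.map (fun s => PySem.Str.lower s) := by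
      intro k
      rw [PySem.List.mem_sorted, PySem.Set.mem_ofList]
    rw [PySem.List.sorted_eq_foldl_insertBy, List.foldl_append, List.foldl_cons, List.foldl_nil,
        ← PySem.List.sorted_eq_foldl_insertBy, ih]
    rw [insert_flatMap x _ _ hKd
      (fun k hk => by
        obtain ⟨y, hy, hyk⟩ := List.mem_map.mp ((hmem_iff k).mp hk)
        exact List.ne_nil_of_mem (List.mem_filter.mpr ⟨hy, by simp [hyk]⟩))
      (fun k hk y hy => by
        have := (List.mem_filter.mp hy).2
        simpa using this)]
    by_cases hm : PySem.Str.lower x ∈ L.map (fun s => PySem.Str.lower s)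
    · rw [if_pos ((hmem_iff _).mpr hm)]
      have hset : PySem.Set.ofList ((L ++ [x]).map (fun s => PySem.Str.lower s))
          = PySem.Set.ofList (L.map (fun s => PySem.Str.lower s)) := by
        rw [List.map_append, PySem.Set.ofList_eq_foldl, List.foldl_append, ← PySem.Set.ofList_eq_foldl]
        simp [PySem.Set.add, PySem.Set.contains, hm]
      rw [hset]
      apply List.flatMap_congr
      intro a ha
      by_cases hax : a = PySem.Str.lower x
      · rw [if_pos hax, List.filter_append]
        simp [hax]
      · rw [if_neg hax, List.filter_append]
        have hb : (PySem.Str.lower x == a) = false := by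
          simp only [beq_eq_false_iff_ne]
          exact fun h => hax h.symm
        simp [hb]
    · rw [if_neg (fun hc => hm ((hmem_iff _).mp hc))]
      have hset : PySem.Set.ofList ((L ++ [x]).map (fun s => PySem.Str.lower s))
          = PySem.Set.ofList (L.map (fun s => PySem.Str.lower s)) ++ [PySem.Str.lower x] := by
        rw [List.map_append, PySem.Set.ofList_eq_foldl, List.foldl_append, ← PySem.Set.ofList_eq_foldl]
        simp [PySem.Set.add, PySem.Set.contains, hm]
      have hKseq : PySem.List.sorted (PySem.Set.ofList (L.map (fun s => PySem.Str.lower s)) ++ [PySem.Str.lower x]) (fun k => k) false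
          = PySem.List.insertBy (fun a b => decide (a < b)) (PySem.Str.lower x)
              (PySem.List.sorted (PySem.Set.ofList (L.map (fun s => PySem.Str.lower s))) (fun k => k) false) := by
        rw [PySem.List.sorted_eq_foldl_insertBy (PySem.Set.ofList (L.map (fun s => PySem.Str.lower s)) ++ [PySem.Str.lower x]),
            List.foldl_append, List.foldl_cons, List.foldl_nil, ← PySem.List.sorted_eq_foldl_insertBy]
      rw [hset, hKseq]
      apply List.flatMap_congr
      intro a ha
      rcases (PySem.List.mem_insertBy _ _ _ _).mp ha with rfl | haK
      · rw [if_pos rfl, List.filter_append]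
        have h1 : L.filter (fun y => PySem.Str.lower y == PySem.Str.lower x) = [] := by
          rw [List.filter_eq_nil_iff]
          intro y hy
          simp only [beq_iff_eq]
          intro hc
          exact hm (List.mem_map.mpr ⟨y, hy, hc⟩)
        simp [h1]
      · have hax : a ≠ PySem.Str.lower x := by
          intro hc
          exact hm (hc ▸ (hmem_iff a).mp haK)
        rw [if_neg hax, List.filter_append]
        have hb : (PySem.Str.lower x == a) = false := by
          simp only [beq_eq_false_iff_ne]
          exact fun h => hax h.symm
        simp [hb]

def goDedup : Option String → List String → List String
  | _, [] => []
  | last, x :: t =>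
    if some (PySem.Str.lower x) ≠ last then x :: goDedup (some (PySem.Str.lower x)) t
    else goDedup last t

theorem foldl_eq_goDedup (s : List String) : ∀ (acc : List String) (last : Option String),
    (s.foldl (fun (acc : List String × Option String) item =>
        if some (PySem.Str.lower item) ≠ acc.2 then (acc.1 ++ [item], some (PySem.Str.lower item))
        else acc) (acc, last)).1
    = acc ++ goDedup last s := by
  induction s with
  | nil => intro acc last; simp [goDedup]
  | cons x t ih =>
    intro acc last
    simp only [List.foldl_cons, goDedup]
    by_cases h : some (PySem.Str.lower x) ≠ last
    · rw [if_pos h, if_pos h, ih]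
      simp
    · rw [if_neg h, if_neg h, ih]

theorem go_skip (last : Option String) (gk rest : List String)
    (h : ∀ y ∈ gk, some (PySem.Str.lower y) = last) :
    goDedup last (gk ++ rest) = goDedup last rest := by
  induction gk with
  | nil => simp
  | cons y t ih =>
    simp only [List.cons_append, goDedup]
    rw [if_neg (by simp [h y (by simp)])]
    exact ih (fun y hy => h y (by simp [hy]))

theorem go_flatMap (K : List String) (g : String → List String) :
    ∀ (last : Option String),
    K.Pairwise (· < ·) → (∀ k ∈ K, g k ≠ []) → (∀ k ∈ K, ∀ y ∈ g k, PySem.Str.lower y = k) →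
    (∀ k ∈ K, last ≠ some k) →
    goDedup last (K.flatMap g) = K.map (fun k => (g k).headD "") := by
  induction K with
  | nil => intro last _ _ _ _; simp [goDedup]
  | cons k K' ih =>
    intro last hK hne hkey hlast
    have hklt := (List.pairwise_cons.mp hK).1
    obtain ⟨y0, ys0, hg⟩ := List.exists_cons_of_ne_nil (hne k (by simp))
    have hy0 : PySem.Str.lower y0 = k := hkey k (by simp) y0 (by simp [hg])
    rw [List.flatMap_cons, hg, List.cons_append]
    simp only [goDedup]
    rw [if_pos (by rw [hy0]; exact fun hc => hlast k (by simp) hc.symm)]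
    rw [hy0]
    rw [go_skip _ ys0 _ (fun y hy => by
      rw [hkey k (by simp) y (by simp [hg, hy])])]
    rw [ih (some k) (List.pairwise_cons.mp hK).2
      (fun a ha => hne a (by simp [ha])) (fun a ha => hkey a (by simp [ha]))
      (fun a ha hc => by
        have hk : k = a := Option.some.inj hc
        exact absurd (hk ▸ hklt a ha) (lt_irrefl a))]
    rw [List.map_cons, hg]
    simp

-- A's loop over 'values' with the empty-item 'continue' is the same fold over the stripped, non-empty items.
theorem foldA_eq_foldL (values : List String) (d : PySem.Dict String String) :
    values.foldl (fun seen value =>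
      let item := PySem.Str.strip value
      if item = "" then seen
      else
        let key := PySem.Str.lower item
        if seen.contains key then seen else seen.insert key item) d
    = ((values.map (fun value => PySem.Str.strip value)).filter (fun item => !(item == ""))).foldl
        (fun seen item =>
          if seen.contains (PySem.Str.lower item) then seen
          else seen.insert (PySem.Str.lower item) item) d := by
  induction values generalizing d with
  | nil => rfl
  | cons v t ih =>
    simp only [List.foldl_cons, List.map_cons, List.filter_cons]
    by_cases h : PySem.Str.strip v = ""
    · simp [h, ih]
    · simp [h, ih]

-- keys of A's fold: exactly the distinct lowercase keys, in first-insertion order.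
theorem keys_foldL (L : List String) (d : PySem.Dict String String) :
    (L.foldl (fun seen item =>
        if seen.contains (PySem.Str.lower item) then seen
        else seen.insert (PySem.Str.lower item) item) d).keys
    = PySem.Set.update d.keys (L.map (fun item => PySem.Str.lower item)) := by
  induction L generalizing d with
  | nil => rfl
  | cons x t ih =>
    simp only [List.foldl_cons, List.map_cons, PySem.Set.update, ]
    by_cases h : d.contains (PySem.Str.lower x)
    · have hmem : PySem.Str.lower x ∈ d.keys := (PySem.Dict.contains_iff_mem_keys d _).mp h
      rw [if_pos h, ih]
      simp [PySem.Set.update, PySem.Set.add, PySem.Set.contains, hmem]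
    · have hmem : PySem.Str.lower x ∉ d.keys := fun hm => h ((PySem.Dict.contains_iff_mem_keys d _).mpr hm)
      rw [if_neg h, ih, PySem.Dict.keys_insert_of_not_contains _ _ (by simpa using h)]
      simp [PySem.Set.update, PySem.Set.add, PySem.Set.contains, hmem]

-- lookup in A's fold: first item of L whose lowercase equals k (behind whatever d already holds).
theorem get?_foldL (L : List String) (d : PySem.Dict String String) (k : String) :
    (L.foldl (fun seen item =>
        if seen.contains (PySem.Str.lower item) then seen
        else seen.insert (PySem.Str.lower item) item) d).get? k
    = (d.get? k).or (L.find? (fun item => PySem.Str.lower item == k)) := by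
  induction L generalizing d with
  | nil => simp
  | cons x t ih =>
    simp only [List.foldl_cons, List.find?_cons]
    by_cases hk : PySem.Str.lower x = k
    · by_cases h : d.contains (PySem.Str.lower x)
      · rw [if_pos h, ih]
        have : (d.get? (PySem.Str.lower x)).isSome := by
          rw [← PySem.Dict.contains_eq_isSome_get?]; exact h
        obtain ⟨v, hv⟩ := Option.isSome_iff_exists.mp (hk ▸ this)
        simp [hv, hk]
      · rw [if_neg h, ih]
        have hnone : d.get? k = none := by
          have hc := PySem.Dict.contains_eq_isSome_get? d (PySem.Str.lower x)
          rw [Bool.not_eq_true, hc] at h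
          rw [← hk]
          exact Option.not_isSome_iff_eq_none.mp (by simp [h])
        rw [hk, PySem.Dict.get?_insert_self]
        simp [hnone]
    · have hne : k ≠ PySem.Str.lower x := fun h => hk h.symm
      by_cases h : d.contains (PySem.Str.lower x)
      · rw [if_pos h, ih]
        have hb : (PySem.Str.lower x == k) = false := by simp [hk]
        rw [hb]
      · rw [if_neg h, ih, PySem.Dict.get?_insert_of_ne _ _ hne]
        have hb : (PySem.Str.lower x == k) = false := by simp [hk]
        rw [hb]


-- ===== VERDICT (by name: the statement is the Claim_ definition above) =====
theorem sorted_unique_py_spec : Claim_equal_sorted_unique_py := by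
  intro values _
  unfold Spec_sorted_unique_py sorted_unique_py sorted_unique_py_alt
  simp only []
  rw [foldA_eq_foldL]
  set L := (values.map (fun value => PySem.Str.strip value)).filter (fun item => !(item == "")) with hL
  rw [keys_foldL]
  have hkeys : PySem.Set.update (PySem.Dict.empty : PySem.Dict String String).keys
      (L.map (fun item => PySem.Str.lower item))
      = PySem.Set.ofList (L.map (fun item => PySem.Str.lower item)) := rfl
  rw [hkeys]
  -- B's side: fold = grouping scan over the stable sort
  rw [foldl_eq_goDedup, List.nil_append, stable_sorted]
  have hKd := PySem.List.sorted_ofList_pairwise_lt (L.map (fun s => PySem.Str.lower s))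
  have hmem_iff : ∀ k, k ∈ PySem.List.sorted (PySem.Set.ofList (L.map (fun s => PySem.Str.lower s))) (fun k => k) false ↔ k ∈ L.map (fun s => PySem.Str.lower s) := fun k => by
    rw [PySem.List.mem_sorted, PySem.Set.mem_ofList]
  rw [go_flatMap _ _ none hKd
    (fun k hk => by
      obtain ⟨y, hy, hyk⟩ := List.mem_map.mp ((hmem_iff k).mp hk)
      exact List.ne_nil_of_mem (List.mem_filter.mpr ⟨hy, by simp [hyk]⟩))
    (fun k hk y hy => by
      have := (List.mem_filter.mp hy).2
      simpa using this)
    (fun k _ => by simp)]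
  apply List.map_congr_left
  intro k _
  rw [PySem.Dict.getD_eq_get?_getD, get?_foldL]
  rw [List.headD_eq_head?_getD, List.head?_filter]
  simp
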